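-- pv_equiv track=rewrite | github.com/MangoMagoCane/Sapienza | Fondamenti di Programmazione/lezione/lezione_6.py | countw
-- ===== SOURCE A (Python) =====
-- def countw(t: str, w: str) -> int:
--     i: int = -1
--     count: int = 0
--     lent: int = len(t)
--     lenw: int = len(w)
--     while (i := t.find(w, i + 1)) != -1:
--         if i + lenw >= lent or not t[i + lenw].isalpha():
--             count += 1
--     return count
-- ===== SOURCE B (Python) =====
-- def countw(t: str, w: str) -> int:
--     lent = len(t)
--     lenw = len(w)
--     count = 0
--     for i in range(lent - lenw + 1):
--         if t[i:i + lenw] == w and (i + lenw >= lent or not t[i + lenw].isalpha()):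
--             count += 1
--     return count
-- ===== Notes on version B (the rewrite author's own statement) =====
-- stated objective: alternative
-- what changed: Replaced the str.find while-loop (jump from occurrence to occurrence) with a direct scan of every candidate start index, testing t[i:i+lenw] == w at each position; range(len(t)-len(w)+1) reproduces find('') semantics for empty w.
import Mathlib
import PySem

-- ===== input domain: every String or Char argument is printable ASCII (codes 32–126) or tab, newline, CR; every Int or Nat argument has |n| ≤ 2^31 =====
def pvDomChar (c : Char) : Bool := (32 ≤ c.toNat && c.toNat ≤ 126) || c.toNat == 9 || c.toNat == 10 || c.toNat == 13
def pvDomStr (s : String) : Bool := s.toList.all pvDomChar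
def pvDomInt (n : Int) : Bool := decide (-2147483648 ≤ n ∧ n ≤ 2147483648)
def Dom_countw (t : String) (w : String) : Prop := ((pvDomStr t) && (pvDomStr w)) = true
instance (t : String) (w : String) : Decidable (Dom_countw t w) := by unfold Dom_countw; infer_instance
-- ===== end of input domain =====

-- B replaces A's str.find while-loop by a direct scan of every candidate start index (alternative decomposition, same cost).


-- ===== PORT A =====
-- the trailing-boundary test 'i + lenw >= lent or not t[i + lenw].isalpha()' (appearing verbatim in both Pythons)
def pvBdry (cs ws : List Char) (i : Int) : Bool :=
  decide ((cs.length : Int) ≤ i + ws.length) ||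
    !(((PySem.List.pyGet? cs (i + (ws.length : Int))).map PySem.Chars.isalpha).getD false)

-- two termination facts about str.find cited by the port's decreasing_by (no computational content)
theorem pvFindFrom_out (cs ws : List Char) (k : Nat) (h : cs.length < k) :
    PySem.Chars.findFrom cs ws (k : Int) none = -1 := by
  simp only [PySem.Chars.findFrom]
  rw [if_pos]
  rw [if_neg (by omega : ¬ ((k : Int) < 0))]
  exact_mod_cast h

theorem pvFindFrom_le (cs ws : List Char) (k : Nat) :
    PySem.Chars.findFrom cs ws (k : Int) none ≤ (cs.length : Int) := by
  simp only [PySem.Chars.findFrom]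
  rw [if_neg (by omega : ¬ ((k : Int) < 0))]
  split
  · omega
  · split
    · omega
    · rename_i hlt _
      have := PySem.Chars.find_le_length (List.drop (Int.toNat k) (List.take (Int.toNat ↑cs.length) cs)) ws
      simp at this ⊢
      omega

-- A raises nowhere: t.find never raises, and t[i+lenw] is only read when i+lenw < lent.
-- 'while (i := t.find(w, i+1)) != -1: …' — recursion on the next search start (strictly increasing, ≤ len t + 1)
def pvLoopA (cs ws : List Char) (start : Nat) (count : Int) : Int :=
  let i := PySem.Chars.findFrom cs ws (start : Int) none
  if h : i = -1 then count
  else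
    have hle : start ≤ cs.length := by
      by_contra hgt
      exact h (pvFindFrom_out cs ws start (Nat.lt_of_not_le hgt))
    have hge : start < i.toNat + 1 := by
      have := (PySem.Chars.findFrom_natCast_spec cs ws start hle h).1
      omega
    have hub : i.toNat ≤ cs.length := by
      have := pvFindFrom_le cs ws start
      omega
    pvLoopA cs ws (i.toNat + 1) (if pvBdry cs ws i then count + 1 else count)
termination_by cs.length + 1 - start
decreasing_by omega

def countw (t : String) (w : String) : Int :=
  -- i starts at -1, so the first search is t.find(w, 0)
  pvLoopA t.toList w.toList 0 0

-- ===== PORT B =====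
-- 'for i in range(lent - lenw + 1): if t[i:i+lenw] == w and (boundary): count += 1'
def countw_alt (t : String) (w : String) : Int :=
  (PySem.List.pyRange 0 ((t.toList.length : Int) - w.toList.length + 1) 1).foldl
    (fun count i =>
      if PySem.List.slice t.toList (some i) (some (i + (w.toList.length : Int))) = w.toList ∧
          pvBdry t.toList w.toList i = true then
        count + 1
      else count) 0

-- ===== PRECONDITION & SPEC =====
def Spec_countw (t : String) (w : String) (out : Int) : Prop := out = countw_alt t w
instance (t : String) (w : String) (out : Int) : Decidable (Spec_countw t w out) := by unfold Spec_countw; infer_instance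

-- ===== CLAIM (what is proved, stated in full; the proofs are below) =====
def Claim_equal_countw : Prop := ∀ (t : String) (w : String), Dom_countw t w → Spec_countw t w (countw t w)

-- ===== LEMMAS AND PROOFS =====

-- the predicate both sides count, on a Nat index
def pvHit (cs ws : List Char) (j : Nat) : Bool :=
  decide (ws <+: cs.drop j) && pvBdry cs ws (j : Int)

-- slice cs [j, j+m) = ws  ↔  ws is a prefix of drop j cs
theorem pvSlice_eq_iff (cs ws : List Char) (j : Nat) :
    PySem.List.slice cs (some (j : Int)) (some ((j : Int) + (ws.length : Int))) = ws ↔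
      ws <+: cs.drop j := by
  rw [PySem.List.slice_natCast_add]
  constructor
  · intro h
    rw [← h]
    exact List.take_prefix _ _
  · intro h
    exact (List.prefix_iff_eq_take.mp h).symm

-- fold of an if-count is countP
theorem pvFoldl_count {α : Type} (p : α → Bool) (l : List α) (c : Int) :
    l.foldl (fun c i => if p i then c + 1 else c) c = c + (l.countP p : Int) := by
  induction l generalizing c with
  | nil => simp
  | cons x xs ih =>
    simp only [List.foldl_cons, List.countP_cons, ih]
    by_cases h : p x = true
    · simp [h]
      ring
    · simp [h]

-- a hit needs the whole of ws to fit: no hits in (cs.length - ws.length, cs.length]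
theorem pvHit_false_of_large (cs ws : List Char) (j : Nat)
    (hj : j ≤ cs.length) (h : (cs.length : Int) - ws.length + 1 ≤ j) : pvHit cs ws j = false := by
  simp only [pvHit, Bool.and_eq_false_iff, decide_eq_false_iff_not]
  left
  intro hpre
  have := hpre.length_le
  rw [List.length_drop] at this
  omega

-- B counts pvHit over [0, cs.length]
theorem pvAlt_eq_countP (t w : String) :
    countw_alt t w = ((List.range' 0 (t.toList.length + 1)).countP (pvHit t.toList w.toList) : Int) := by
  unfold countw_alt
  set cs := t.toList with hcs
  set ws := w.toList with hws
  rw [PySem.List.pyRange_one]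
  rw [List.foldl_map]
  have hfold := pvFoldl_count
      (fun k : Nat => decide
        (PySem.List.slice cs (some ((0 : Int) + k)) (some ((0 : Int) + k + (ws.length : Int))) = ws ∧
          pvBdry cs ws ((0 : Int) + k) = true))
      (List.range (((cs.length : Int) - ws.length + 1).toNat)) 0
  simp only [decide_eq_true_eq] at hfold
  simp only [Int.sub_zero]
  rw [hfold]
  have hcp : ∀ k : Nat,
      (decide (PySem.List.slice cs (some ((0 : Int) + k)) (some ((0 : Int) + k + (ws.length : Int))) = ws ∧
        pvBdry cs ws ((0 : Int) + k) = true)) = pvHit cs ws k := by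
    intro k
    simp only [zero_add, pvHit]
    rw [show (decide (ws <+: cs.drop k) && pvBdry cs ws (k : Int)) =
        decide (ws <+: cs.drop k ∧ pvBdry cs ws (k : Int) = true) by simp]
    congr 1
    simp only [eq_iff_iff]
    constructor
    · rintro ⟨h1, h2⟩; exact ⟨(pvSlice_eq_iff cs ws k).mp h1, h2⟩
    · rintro ⟨h1, h2⟩; exact ⟨(pvSlice_eq_iff cs ws k).mpr h1, h2⟩
  rw [List.countP_congr (by intro k _; rw [hcp k])]
  -- extend the count range from [0, K) to [0, cs.length + 1): the tail is all-false
  set K := (((cs.length : Int) - ws.length + 1)).toNat with hK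
  rw [List.range_eq_range']
  have hsplit : List.range' 0 (cs.length + 1) = List.range' 0 K ++ List.range' K (cs.length + 1 - K) := by
    have e := List.range'_append (s := 0) (m := K) (n := cs.length + 1 - K) (step := 1)
    simp only [one_mul, Nat.zero_add] at e
    conv_lhs => rw [show cs.length + 1 = K + (cs.length + 1 - K) from by omega]
    exact e.symm
  rw [hsplit, List.countP_append]
  have htail : (List.range' K (cs.length + 1 - K)).countP (pvHit cs ws) = 0 := by
    rw [List.countP_eq_zero]
    intro j hj
    rw [List.mem_range'] at hj
    obtain ⟨k, hk, rfl⟩ := hj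
    exact (Bool.not_eq_true _).mpr (pvHit_false_of_large cs ws _ (by omega) (by omega))
  rw [htail]
  simp

-- A's loop counts pvHit over [start, cs.length]
theorem pvLoopA_eq (cs ws : List Char) (start : Nat) (count : Int) :
    pvLoopA cs ws start count =
      count + ((List.range' start (cs.length + 1 - start)).countP (pvHit cs ws) : Int) := by
  by_cases hle : start ≤ cs.length
  case neg =>
    rw [pvLoopA]
    rw [dif_pos (pvFindFrom_out cs ws start (Nat.lt_of_not_le hle))]
    have : cs.length + 1 - start = 0 := by omega
    simp [this]
  case pos =>
    rw [pvLoopA]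
    by_cases h : PySem.Chars.findFrom cs ws (start : Int) none = -1
    case pos =>
      rw [dif_pos h]
      have hnin : ¬ ws <:+: cs.drop start :=
        (PySem.Chars.findFrom_natCast_eq_neg_one_iff cs ws start hle).mp h
      have hz : (List.range' start (cs.length + 1 - start)).countP (pvHit cs ws) = 0 := by
        rw [List.countP_eq_zero]
        intro j hj
        rw [List.mem_range'] at hj
        obtain ⟨k, hk, rfl⟩ := hj
        set j := start + 1 * k with hjdef
        intro hcontra
        simp only [pvHit, Bool.and_eq_true, decide_eq_true_eq] at hcontra
        obtain ⟨hpre, -⟩ := hcontra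
        apply hnin
        have hdd : cs.drop j = (cs.drop start).drop (j - start) := by
          rw [List.drop_drop]; congr 1; omega
        rw [hdd] at hpre
        exact hpre.isInfix.trans (List.drop_suffix _ _).isInfix
      rw [hz]
      simp
    case neg =>
      rw [dif_neg h]
      set i := PySem.Chars.findFrom cs ws (start : Int) none with hi
      have hspec := PySem.Chars.findFrom_natCast_spec cs ws start hle h
      have hpre : ws <+: cs.drop i.toNat := hspec.2.1
      have hmin : ∀ j : Nat, start ≤ j → j < i.toNat → ¬ ws <+: cs.drop j := hspec.2.2
      have hge : start ≤ i.toNat := by have := hspec.1; omega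
      have hub : i.toNat ≤ cs.length := by have := pvFindFrom_le cs ws start; omega
      have hnn : (0 : Int) ≤ i := le_trans (by positivity) hspec.1
      rw [pvLoopA_eq cs ws (i.toNat + 1)]
      -- split [start, len] = [start, i) ++ [i] ++ [i+1, len]
      have hsplit : List.range' start (cs.length + 1 - start) =
          List.range' start (i.toNat - start) ++ List.range' i.toNat 1 ++
            List.range' (i.toNat + 1) (cs.length + 1 - (i.toNat + 1)) := by
        have e1 := List.range'_append (s := i.toNat) (m := 1)
          (n := cs.length + 1 - (i.toNat + 1)) (step := 1)
        simp only [mul_one] at e1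
        have e2 := List.range'_append (s := start) (m := i.toNat - start)
          (n := 1 + (cs.length + 1 - (i.toNat + 1))) (step := 1)
        simp only [one_mul] at e2
        rw [show start + (i.toNat - start) = i.toNat from by omega] at e2
        rw [List.append_assoc, e1, e2]
        congr 1
        omega
      rw [hsplit, List.countP_append, List.countP_append]
      have h1 : (List.range' start (i.toNat - start)).countP (pvHit cs ws) = 0 := by
        rw [List.countP_eq_zero]
        intro j hj
        rw [List.mem_range'] at hj
        obtain ⟨k, hk, rfl⟩ := hj
        intro hcontra
        simp only [pvHit, Bool.and_eq_true, decide_eq_true_eq] at hcontra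
        exact hmin _ (by omega) (by omega) hcontra.1
      have hcast : ((i.toNat : Nat) : Int) = i := Int.toNat_of_nonneg hnn
      have h2 : (List.range' i.toNat 1).countP (pvHit cs ws) =
          if pvBdry cs ws i then 1 else 0 := by
        simp only [List.range'_one, List.countP_singleton, pvHit, hcast]
        rw [decide_eq_true hpre]
        by_cases hb : pvBdry cs ws i <;> simp [hb]
      rw [h1, h2]
      rw [← hi]
      by_cases hb : pvBdry cs ws i
      · simp only [hb, if_true]
        push_cast
        ring
      · simp only [hb, if_false, Bool.false_eq_true]
        push_cast
        ring
termination_by cs.length + 1 - start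
decreasing_by omega

-- ===== VERDICT (by name: the statement is the Claim_ definition above) =====
theorem countw_spec : Claim_equal_countw := by
  intro t w _
  unfold Spec_countw countw
  rw [pvLoopA_eq, pvAlt_eq_countP]
  simp
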